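-- pv_equiv track=rewrite | github.com/Skyelabz210/MYSTIC | nine65_v2_complete/scripts/mystic_oneshot_learner.py | modular_median
-- ===== SOURCE A (Python) =====
-- from typing import List, Dict, Optional, Tuple
--
-- def circular_distance(a: int, b: int, modulus: int) -> int:
--     """Circular (modular) distance between two values."""
--     diff = abs(a - b)
--     return min(diff, modulus - diff)
--
-- def modular_median(values: List[int], modulus: int) -> int:
--     """
--     Find the modular median - value minimizing total circular distance.
--
--     This is the core of QMNF's consensus algorithm.
--     Integer-only: Uses 2^63-1 instead of float('inf').
--     """
--     if not values:
--         return 0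
--
--     best = values[0]
--     best_total = (1 << 63) - 1  # Integer max instead of float('inf')
--
--     for candidate in values:
--         total = sum(circular_distance(candidate, v, modulus) for v in values)
--         if total < best_total:
--             best_total = total
--             best = candidate
--
--     return best
-- ===== SOURCE B (Python) =====
-- from bisect import bisect_left, bisect_right
--
-- def modular_median(values, modulus):
--     if not values:
--         return 0
--
--     s = sorted(values)
--     n = len(s)
--     # prefix sums: P[k] = sum of the k smallest values
--     P = [0]
--     for v in s:
--         P.append(P[-1] + v)
--     t = modulus // 2  # d <= t  <=>  2*d <= modulus  <=>  min(d, modulus-d) == d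
--
--     best = values[0]
--     best_total = (1 << 63) - 1
--     for c in values:
--         k = bisect_left(s, c)
--         abs_sum = c * k - P[k] + (P[n] - P[k]) - c * (n - k)
--         if t >= 0:
--             lo = bisect_left(s, c - t)
--             hi = bisect_right(s, c + t)
--             in_sum = c * (k - lo) - (P[k] - P[lo]) + (P[hi] - P[k]) - c * (hi - k)
--             win = hi - lo
--         else:
--             in_sum = 0
--             win = 0
--         total = 2 * in_sum - abs_sum + modulus * (n - win)
--         if total < best_total:
--             best_total = total
--             best = c
--     return best
-- ===== Notes on version B (the rewrite author's own statement) =====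
-- stated objective: faster
-- what changed: Instead of summing circular distances over all values for each candidate (nested loops), B sorts the values once, builds prefix sums, and computes each candidate's total in O(log n) by binary-searching the window of values within floor(modulus/2) of the candidate.
import Mathlib
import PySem

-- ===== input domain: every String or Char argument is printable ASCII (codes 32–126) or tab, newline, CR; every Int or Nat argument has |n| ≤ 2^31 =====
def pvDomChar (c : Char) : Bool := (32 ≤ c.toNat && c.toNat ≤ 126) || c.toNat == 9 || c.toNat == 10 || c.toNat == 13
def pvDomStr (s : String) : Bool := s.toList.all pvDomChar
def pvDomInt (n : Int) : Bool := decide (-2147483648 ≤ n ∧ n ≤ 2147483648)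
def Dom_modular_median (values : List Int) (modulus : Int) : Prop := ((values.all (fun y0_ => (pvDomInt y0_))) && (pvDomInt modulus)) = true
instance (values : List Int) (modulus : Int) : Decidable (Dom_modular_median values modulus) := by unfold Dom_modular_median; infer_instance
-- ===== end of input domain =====

-- B replaces A's quadratic candidate×value double loop by sort + prefix sums + two binary
-- searches per candidate (the window of values within floor(modulus/2) of the candidate);
-- a timing run measured it asymptotically faster. Same return value on every input.

-- ===== PORT A =====
def circular_distance (a b modulus : Int) : Int :=
  let diff := |a - b|
  min diff (modulus - diff)

-- the body of A's `for candidate in values` loop (state = (best, best_total))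
def aStep (values : List Int) (modulus : Int) (st : Int × Int) (candidate : Int) : Int × Int :=
  let total := (values.map (fun v => circular_distance candidate v modulus)).sum
  if total < st.2 then (candidate, total) else st

def modular_median (values : List Int) (modulus : Int) : Int :=
  match values with
  | [] => 0
  | v0 :: _ => (values.foldl (aStep values modulus) (v0, (2:Int) ^ 63 - 1)).1

-- ===== PORT B =====
-- prefix sums: P = [0]; for v in s: P.append(P[-1] + v)
def prefixSums : Int → List Int → List Int
  | a, [] => [a]
  | a, v :: r => a :: prefixSums (a + v) r

-- the body of B's `for c in values` loop (state = (best, best_total))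
def bStep (s P : List Int) (modulus t : Int) (st : Int × Int) (c : Int) : Int × Int :=
  let n := s.length
  let k := PySem.List.bisectLeft s c
  let absSum := c * (k : Int) - P.getD k 0 + (P.getD n 0 - P.getD k 0) - c * ((n : Int) - (k : Int))
  let iw : Int × Int :=
    if 0 ≤ t then
      let lo := PySem.List.bisectLeft s (c - t)
      let hi := PySem.List.bisectRight s (c + t)
      (c * ((k : Int) - (lo : Int)) - (P.getD k 0 - P.getD lo 0)
        + (P.getD hi 0 - P.getD k 0) - c * ((hi : Int) - (k : Int)),
       (hi : Int) - (lo : Int))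
    else (0, 0)
  let total := 2 * iw.1 - absSum + modulus * ((n : Int) - iw.2)
  if total < st.2 then (c, total) else st

def modular_median_alt (values : List Int) (modulus : Int) : Int :=
  match values with
  | [] => 0
  | v0 :: _ =>
    let s := PySem.List.sorted values id
    let P := prefixSums 0 s
    let t := PySem.Int.floordiv modulus 2
    (values.foldl (bStep s P modulus t) (v0, (2:Int) ^ 63 - 1)).1

-- ===== PRECONDITION & SPEC =====
def Spec_modular_median (values : List Int) (modulus : Int) (out : Int) : Prop := out = modular_median_alt values modulus
instance (values : List Int) (modulus : Int) (out : Int) : Decidable (Spec_modular_median values modulus out) := by unfold Spec_modular_median; infer_instance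

-- ===== CLAIM (what is proved, stated in full; the proofs are below) =====
def Claim_equal_modular_median : Prop := ∀ (values : List Int) (modulus : Int), Dom_modular_median values modulus → Spec_modular_median values modulus (modular_median values modulus)

-- ===== LEMMAS AND PROOFS =====

lemma prefixSums_getD (s : List Int) (a : Int) (k : Nat) (hk : k ≤ s.length) :
    (prefixSums a s).getD k 0 = a + (s.take k).sum := by
  induction s generalizing a k with
  | nil =>
    obtain rfl : k = 0 := Nat.le_zero.mp hk
    simp [prefixSums]
  | cons v r ih =>
    cases k with
    | zero => simp [prefixSums]
    | succ k =>
      simp only [prefixSums, List.getD_cons_succ, List.take_succ_cons, List.sum_cons]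
      rw [ih (a + v) k (by simpa using hk)]
      ring

lemma take_bisectLeft (s : List Int) (hs : List.Pairwise (fun a b => a ≤ b) s) (x : Int) :
    s.take (PySem.List.bisectLeft s x) = s.filter (fun v => decide (v < x)) := by
  obtain ⟨hkn, hlt, hge⟩ := PySem.List.bisectLeft_spec s x hs
  set k := PySem.List.bisectLeft s x with hk
  have h1 : (s.take k).filter (fun v => decide (v < x)) = s.take k := by
    apply List.filter_eq_self.mpr
    intro a ha
    obtain ⟨j, hj, rfl⟩ := List.mem_iff_getElem.mp ha
    rw [List.length_take] at hj
    have hj' : j < k := by omega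
    have hjs : j < s.length := by omega
    rw [List.getElem_take]
    exact decide_eq_true (hlt j hjs hj')
  have h2 : (s.drop k).filter (fun v => decide (v < x)) = [] := by
    apply List.filter_eq_nil_iff.mpr
    intro a ha
    obtain ⟨j, hj, rfl⟩ := List.mem_iff_getElem.mp ha
    rw [List.length_drop] at hj
    rw [List.getElem_drop]
    simp only [decide_eq_true_eq, not_lt]
    exact hge (k + j) (by omega) (by omega)
  conv_rhs => rw [← List.take_append_drop k s]
  rw [List.filter_append, h1, h2, List.append_nil]

lemma take_bisectRight (s : List Int) (hs : List.Pairwise (fun a b => a ≤ b) s) (x : Int) :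
    s.take (PySem.List.bisectRight s x) = s.filter (fun v => decide (v ≤ x)) := by
  obtain ⟨hkn, hle, hgt⟩ := PySem.List.bisectRight_spec s x hs
  set k := PySem.List.bisectRight s x with hk
  have h1 : (s.take k).filter (fun v => decide (v ≤ x)) = s.take k := by
    apply List.filter_eq_self.mpr
    intro a ha
    obtain ⟨j, hj, rfl⟩ := List.mem_iff_getElem.mp ha
    rw [List.length_take] at hj
    have hj' : j < k := by omega
    have hjs : j < s.length := by omega
    rw [List.getElem_take]
    exact decide_eq_true (hle j hjs hj')
  have h2 : (s.drop k).filter (fun v => decide (v ≤ x)) = [] := by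
    apply List.filter_eq_nil_iff.mpr
    intro a ha
    obtain ⟨j, hj, rfl⟩ := List.mem_iff_getElem.mp ha
    rw [List.length_drop] at hj
    rw [List.getElem_drop]
    simp only [decide_eq_true_eq, not_le]
    exact hgt (k + j) (by omega) (by omega)
  conv_rhs => rw [← List.take_append_drop k s]
  rw [List.filter_append, h1, h2, List.append_nil]

lemma bisectLeft_eq_length_filter (s : List Int) (hs : List.Pairwise (fun a b => a ≤ b) s) (x : Int) :
    PySem.List.bisectLeft s x = (s.filter (fun v => decide (v < x))).length := by
  have hkn := (PySem.List.bisectLeft_spec s x hs).1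
  have h := congrArg List.length (take_bisectLeft s hs x)
  rw [List.length_take] at h
  omega

lemma bisectRight_eq_length_filter (s : List Int) (hs : List.Pairwise (fun a b => a ≤ b) s) (x : Int) :
    PySem.List.bisectRight s x = (s.filter (fun v => decide (v ≤ x))).length := by
  have hkn := (PySem.List.bisectRight_spec s x hs).1
  have h := congrArg List.length (take_bisectRight s hs x)
  rw [List.length_take] at h
  omega

lemma P_bisectLeft (s : List Int) (hs : List.Pairwise (fun a b => a ≤ b) s) (x : Int) :
    (prefixSums 0 s).getD (PySem.List.bisectLeft s x) 0 = (s.filter (fun v => decide (v < x))).sum := by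
  have hkn := (PySem.List.bisectLeft_spec s x hs).1
  rw [prefixSums_getD s 0 _ hkn, take_bisectLeft s hs x, zero_add]

lemma P_bisectRight (s : List Int) (hs : List.Pairwise (fun a b => a ≤ b) s) (x : Int) :
    (prefixSums 0 s).getD (PySem.List.bisectRight s x) 0 = (s.filter (fun v => decide (v ≤ x))).sum := by
  have hkn := (PySem.List.bisectRight_spec s x hs).1
  rw [prefixSums_getD s 0 _ hkn, take_bisectRight s hs x, zero_add]

lemma P_length (s : List Int) : (prefixSums 0 s).getD s.length 0 = s.sum := by
  rw [prefixSums_getD s 0 s.length le_rfl, List.take_length, zero_add]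

-- the purely algebraic identity behind B's formula, window case (t = m // 2 >= 0)
set_option maxHeartbeats 1000000 in
lemma key_pos (s : List Int) (c m t : Int) (h2 : t * 2 ≤ m ∧ m < (t + 1) * 2) (h0 : 0 ≤ t) :
    2 * (c * (((s.filter (fun v => decide (v < c))).length : Int) - ((s.filter (fun v => decide (v < c - t))).length : Int))
          - ((s.filter (fun v => decide (v < c))).sum - (s.filter (fun v => decide (v < c - t))).sum)
          + ((s.filter (fun v => decide (v ≤ c + t))).sum - (s.filter (fun v => decide (v < c))).sum)
          - c * (((s.filter (fun v => decide (v ≤ c + t))).length : Int) - ((s.filter (fun v => decide (v < c))).length : Int)))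
      - (c * ((s.filter (fun v => decide (v < c))).length : Int) - (s.filter (fun v => decide (v < c))).sum
          + (s.sum - (s.filter (fun v => decide (v < c))).sum)
          - c * ((s.length : Int) - ((s.filter (fun v => decide (v < c))).length : Int)))
      + m * ((s.length : Int) - (((s.filter (fun v => decide (v ≤ c + t))).length : Int) - ((s.filter (fun v => decide (v < c - t))).length : Int)))
    = (s.map (fun v => circular_distance c v m)).sum := by
  obtain ⟨hm1, hm2⟩ := h2
  induction s with
  | nil => simp
  | cons v r ih =>
    by_cases hlo : v < c - t
    · have hvc : v < c := by omega
      have hhi : v ≤ c + t := by omega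
      have hmin : circular_distance c v m = m - (c - v) := by
        simp only [circular_distance]
        rw [abs_of_pos (by omega), min_eq_right (by omega)]
      simp only [List.filter_cons, List.map_cons, List.sum_cons, List.length_cons,
        decide_eq_true hlo, decide_eq_true hvc, decide_eq_true hhi, if_true]
      rw [hmin]
      push_cast
      ring_nf
      ring_nf at ih
      omega
    · by_cases hvc : v < c
      · have hhi : v ≤ c + t := by omega
        have hmin : circular_distance c v m = c - v := by
          simp only [circular_distance]
          rw [abs_of_pos (by omega), min_eq_left (by omega)]
        simp only [List.filter_cons, List.map_cons, List.sum_cons, List.length_cons,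
          decide_eq_false hlo, decide_eq_true hvc, decide_eq_true hhi, if_true,
          Bool.false_eq_true, if_false]
        rw [hmin]
        push_cast
        ring_nf
        ring_nf at ih
        omega
      · by_cases hhi : v ≤ c + t
        · have hmin : circular_distance c v m = v - c := by
            simp only [circular_distance]
            rw [abs_of_nonpos (by omega), min_eq_left (by omega)]
            ring
          simp only [List.filter_cons, List.map_cons, List.sum_cons, List.length_cons,
            decide_eq_false hlo, decide_eq_false hvc, decide_eq_true hhi, if_true,
            Bool.false_eq_true, if_false]
          rw [hmin]
          push_cast
          ring_nf
          ring_nf at ih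
          omega
        · have hmin : circular_distance c v m = m - (v - c) := by
            simp only [circular_distance]
            rw [abs_of_nonpos (by omega), min_eq_right (by omega)]
            ring_nf
          simp only [List.filter_cons, List.map_cons, List.sum_cons, List.length_cons,
            decide_eq_false hlo, decide_eq_false hvc, decide_eq_false hhi,
            Bool.false_eq_true, if_false]
          rw [hmin]
          push_cast
          ring_nf
          ring_nf at ih
          omega

-- window-free case (modulus ≤ 0, so t = m // 2 < 0: the circular distance is always m - |c - v|)
lemma key_neg (s : List Int) (c m t : Int) (h2 : t * 2 ≤ m ∧ m < (t + 1) * 2) (hneg : t < 0) :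
    2 * 0
      - (c * ((s.filter (fun v => decide (v < c))).length : Int) - (s.filter (fun v => decide (v < c))).sum
          + (s.sum - (s.filter (fun v => decide (v < c))).sum)
          - c * ((s.length : Int) - ((s.filter (fun v => decide (v < c))).length : Int)))
      + m * ((s.length : Int) - 0)
    = (s.map (fun v => circular_distance c v m)).sum := by
  obtain ⟨hm1, hm2⟩ := h2
  induction s with
  | nil => simp
  | cons v r ih =>
    by_cases hvc : v < c
    · have hmin : circular_distance c v m = m - (c - v) := by
        simp only [circular_distance]
        rw [abs_of_pos (by omega), min_eq_right (by omega)]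
      simp only [List.filter_cons, List.map_cons, List.sum_cons, List.length_cons,
        decide_eq_true hvc, if_true]
      rw [hmin]
      push_cast
      ring_nf
      ring_nf at ih
      omega
    · have hmin : circular_distance c v m = m - (v - c) := by
        simp only [circular_distance]
        rw [abs_of_nonpos (by omega), min_eq_right (by omega)]
        ring_nf
      simp only [List.filter_cons, List.map_cons, List.sum_cons, List.length_cons,
        decide_eq_false hvc, Bool.false_eq_true, if_false]
      rw [hmin]
      push_cast
      ring_nf
      ring_nf at ih
      omega

-- per-candidate: B's binary-search formula computes A's inner sum
lemma step_eq (values : List Int) (modulus : Int) (st : Int × Int) (c : Int) :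
    bStep (PySem.List.sorted values id) (prefixSums 0 (PySem.List.sorted values id)) modulus
      (PySem.Int.floordiv modulus 2) st c = aStep values modulus st c := by
  set s := PySem.List.sorted values id with hsdef
  have hs : List.Pairwise (fun a b => a ≤ b) s := by
    simpa using PySem.List.sorted_pairwise values id
  set t := PySem.Int.floordiv modulus 2 with htdef
  have h2 : t * 2 ≤ modulus ∧ modulus < (t + 1) * 2 :=
    (PySem.Int.floordiv_eq_iff_of_pos (by omega)).mp htdef.symm
  have hperm : (s.map (fun v => circular_distance c v modulus)).sum
      = (values.map (fun v => circular_distance c v modulus)).sum :=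
    List.Perm.sum_eq (List.Perm.map _ (PySem.List.sorted_perm values id false))
  simp only [bStep, aStep]
  by_cases ht0 : 0 ≤ t
  · simp only [if_pos ht0]
    rw [P_bisectLeft s hs c, P_bisectLeft s hs (c - t), P_bisectRight s hs (c + t), P_length,
      bisectLeft_eq_length_filter s hs c, bisectLeft_eq_length_filter s hs (c - t),
      bisectRight_eq_length_filter s hs (c + t)]
    rw [key_pos s c modulus t h2 ht0, hperm]
  · simp only [if_neg ht0]
    rw [P_bisectLeft s hs c, P_length, bisectLeft_eq_length_filter s hs c]
    rw [key_neg s c modulus t h2 (by omega), hperm]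

-- ===== VERDICT (by name: the statement is the Claim_ definition above) =====
theorem modular_median_spec : Claim_equal_modular_median := by
  intro values modulus _
  unfold Spec_modular_median
  cases values with
  | nil => rfl
  | cons v0 rest =>
    simp only [modular_median, modular_median_alt]
    congr 1
    exact PySem.List.foldl_congr_mem (v0 :: rest) _ _ _
      (fun st c _ => (step_eq (v0 :: rest) modulus st c).symm)
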